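-- pv_equiv track=rewrite | github.com/aditdamodaran/ctci | Chapter 1 - Arrays and Strings/rotateMatrix.py | createMatrix
-- ===== SOURCE A (Python) =====
-- def createMatrix(N):
--     matrix = []
--     # Used for testing
--     for i in range(0,N):
--         row = []
--         for j in range(N*i,(N*i)+N):
--             # add leading zeroes to make printing prettier when N>3
--             idx = str(j+1).zfill(len(str(N*N)))
--             row.append(idx)
--         matrix.append(row)
--     return matrix
-- ===== SOURCE B (Python) =====
-- def _inc(rds):
--     # increment a little-endian list of decimal digit chars (carry propagation)
--     if not rds:
--         return []
--     if rds[0] == '9':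
--         return ['0'] + _inc(rds[1:])
--     return [chr(ord(rds[0]) + 1)] + rds[1:]
--
--
-- def createMatrix(N):
--     if N <= 0:
--         return []
--     w = len(str(N * N))
--     ctr = ['0'] * w  # little-endian fixed-width decimal odometer
--     matrix = []
--     for _ in range(N):
--         row = []
--         for _ in range(N):
--             ctr = _inc(ctr)
--             row.append(''.join(reversed(ctr)))
--         matrix.append(row)
--     return matrix
-- ===== Notes on version B (the rewrite author's own statement) =====
-- stated objective: alternative
-- what changed: B replaces per-cell integer formatting (str + zfill for every index computed from the row/column arithmetic) by a fixed-width decimal string odometer: a little-endian list of digit characters incremented in place with carry for each cell, so no number-to-string conversion happens per cell.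
import Mathlib
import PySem

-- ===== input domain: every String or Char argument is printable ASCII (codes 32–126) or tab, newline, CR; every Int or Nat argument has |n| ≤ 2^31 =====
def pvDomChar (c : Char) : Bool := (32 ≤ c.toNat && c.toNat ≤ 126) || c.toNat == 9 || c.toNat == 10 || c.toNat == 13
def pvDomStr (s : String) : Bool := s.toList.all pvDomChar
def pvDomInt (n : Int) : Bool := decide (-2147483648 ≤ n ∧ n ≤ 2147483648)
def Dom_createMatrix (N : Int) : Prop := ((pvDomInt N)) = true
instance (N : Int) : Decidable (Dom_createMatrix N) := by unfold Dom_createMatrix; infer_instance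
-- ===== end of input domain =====

-- B replaces A's per-cell integer formatting (str+zfill of each computed index) by a fixed-width
-- decimal string odometer incremented with carry for each cell (objective: alternative).

-- ===== PORT A =====
def createMatrix (N : Int) : List (List String) :=
  (PySem.List.pyRange 0 N 1).foldl (fun matrix i =>
    matrix ++ [(PySem.List.pyRange (N * i) (N * i + N) 1).foldl (fun row j =>
      row ++ [PySem.Str.zfill (PySem.Int.toStr (j + 1)) (PySem.Str.len (PySem.Int.toStr (N * N)))]) []]) []

-- ===== PORT B =====
-- _inc: increment a little-endian list of decimal digit chars with carry.
-- chr(ord(c)+1) is ported as Char.ofNat (c.toNat + 1) (exact: digit codepoints are valid).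
def pvInc : List Char → List Char
  | [] => []
  | c :: t => if c = '9' then '0' :: pvInc t else Char.ofNat (c.toNat + 1) :: t

-- ''.join(reversed(ctr)) is ported as String.ofList ctr.reverse (exact: 1-char strings).
def createMatrix_alt (N : Int) : List (List String) :=
  if N ≤ 0 then [] else
    let w := PySem.Str.len (PySem.Int.toStr (N * N))
    ((PySem.List.pyRange 0 N 1).foldl
      (fun (st : List Char × List (List String)) _ =>
        let inner := (PySem.List.pyRange 0 N 1).foldl
          (fun (st2 : List Char × List String) _ =>
            let c := pvInc st2.1
            (c, st2.2 ++ [String.ofList c.reverse]))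
          (st.1, ([] : List String))
        (inner.1, st.2 ++ [inner.2]))
      (List.replicate w.toNat '0', ([] : List (List String)))).2

-- ===== PRECONDITION & SPEC =====
def Spec_createMatrix (N : Int) (out : List (List String)) : Prop := out = createMatrix_alt N
instance (N : Int) (out : List (List String)) : Decidable (Spec_createMatrix N out) := by unfold Spec_createMatrix; infer_instance

-- ===== CLAIM =====
def Claim_equal_createMatrix : Prop := ∀ (N : Int), Dom_createMatrix N → Spec_createMatrix N (createMatrix N)

-- ===== LEMMAS AND PROOFS =====

def pvDigits (n : Nat) : List Char :=
  if n < 10 then [Nat.digitChar n]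
  else pvDigits (n / 10) ++ [Nat.digitChar (n % 10)]
decreasing_by exact Nat.div_lt_self (by omega) (by omega)

theorem pvDigits_len_pos (n : Nat) : 1 ≤ (pvDigits n).length := by
  unfold pvDigits; split <;> simp

theorem pvDigits_lt (n : Nat) : n < 10 ^ (pvDigits n).length := by
  induction n using pvDigits.induct with
  | case1 n h => rw [pvDigits, if_pos h]; simpa using h
  | case2 n h ih =>
    rw [pvDigits, if_neg h]
    simp only [List.length_append, List.length_singleton]
    rw [pow_succ]
    have h2 := Nat.div_add_mod n 10
    have h3 : n % 10 < 10 := Nat.mod_lt _ (by omega)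
    nlinarith [ih]

theorem pvDigits_ge (n : Nat) (h1 : 1 ≤ n) : 10 ^ ((pvDigits n).length - 1) ≤ n := by
  induction n using pvDigits.induct with
  | case1 n h => rw [pvDigits, if_pos h]; simpa using h1
  | case2 n h ih =>
    rw [pvDigits, if_neg h]
    have hp := pvDigits_len_pos (n / 10)
    have ih2 := ih (by omega)
    simp only [List.length_append, List.length_singleton]
    have : (pvDigits (n/10)).length + 1 - 1 = ((pvDigits (n/10)).length - 1) + 1 := by omega
    rw [this, pow_succ]
    have h2 := Nat.div_add_mod n 10
    generalize 10 ^ ((pvDigits (n / 10)).length - 1) = X at ih2 ⊢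
    omega

theorem pvDigits_len_mono {m k : Nat} (h : m ≤ k) : (pvDigits m).length ≤ (pvDigits k).length := by
  rcases Nat.eq_zero_or_pos m with rfl | hm
  · have : pvDigits 0 = ['0'] := by rw [pvDigits]; simp [Nat.digitChar]
    rw [this]; simpa using pvDigits_len_pos k
  by_contra hc
  rw [Nat.not_le] at hc
  have h1 := pvDigits_lt k
  have h2 := pvDigits_ge m hm
  have h3 : (pvDigits k).length ≤ (pvDigits m).length - 1 := by omega
  have := Nat.pow_le_pow_right (by omega : 1 ≤ 10) h3
  omega

theorem pvDigits_head (n : Nat) : ∃ d t, d < 10 ∧ pvDigits n = Nat.digitChar d :: t := by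
  induction n using pvDigits.induct with
  | case1 n h => exact ⟨n, [], h, by rw [pvDigits, if_pos h]⟩
  | case2 n h ih =>
    obtain ⟨d, t, hd, he⟩ := ih
    exact ⟨d, t ++ [Nat.digitChar (n % 10)], hd, by rw [pvDigits, if_neg h, he]; simp⟩

theorem pv_toDigitsCore_eq (f : Nat) : ∀ (n : Nat) (acc : List Char), n < f →
    Nat.toDigitsCore 10 f n acc = pvDigits n ++ acc := by
  induction f with
  | zero => intro n acc h; omega
  | succ f ih =>
    intro n acc h
    rw [Nat.toDigitsCore]
    by_cases h0 : n / 10 = 0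
    · have hn : n < 10 := by omega
      rw [if_pos h0, pvDigits, if_pos hn, Nat.mod_eq_of_lt hn]
      simp
    · have hn : 10 ≤ n := by omega
      have hd : n / 10 < n := Nat.div_lt_self (by omega) (by omega)
      have hrec := ih (n/10) (Nat.digitChar (n % 10) :: acc) (by omega)
      have hn2 : pvDigits n = pvDigits (n/10) ++ [Nat.digitChar (n%10)] := by
        conv_lhs => rw [pvDigits]
        rw [if_neg (by omega)]
      rw [if_neg h0, hrec, hn2]
      simp

theorem pv_toChars_eq (m : Nat) : PySem.Int.toChars (m : Int) = pvDigits m := by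
  rw [PySem.Int.toChars, if_neg (by omega), Int.toNat_natCast, Nat.toDigits,
    pv_toDigitsCore_eq (m+1) m [] (by omega)]
  simp

def pvFD : Nat → Nat → List Char
  | 0, _ => []
  | w+1, k => Nat.digitChar (k % 10) :: pvFD w (k / 10)

theorem pv_digitChar_not_sign (d : Nat) (hd : d < 10) : ¬ (Nat.digitChar d = '+' ∨ Nat.digitChar d = '-') := by
  interval_cases d <;> decide

theorem pv_zfill_digits (n : Nat) (wi : Int) (h0 : 0 ≤ wi)
    (hle : (pvDigits n).length ≤ wi.toNat) :
    PySem.Chars.zfill (pvDigits n) wi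
      = List.replicate (wi.toNat - (pvDigits n).length) '0' ++ pvDigits n := by
  by_cases hc : wi ≤ ((pvDigits n).length : Int)
  · have h1 : wi.toNat = (pvDigits n).length := by omega
    rw [PySem.Chars.zfill.eq_def, if_pos hc, h1]
    simp
  · obtain ⟨d, t, hd, he⟩ := pvDigits_head n
    have hsign := pv_digitChar_not_sign d hd
    rw [he] at hc ⊢
    rw [PySem.Chars.zfill.eq_def, if_neg hc]
    simp only [if_neg hsign]

theorem pvFD_zero (w : Nat) : pvFD w 0 = List.replicate w '0' := by
  induction w with
  | zero => rfl
  | succ w ih => simp [pvFD, ih, List.replicate_succ, Nat.digitChar]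

theorem pvFD_eq (w : Nat) : ∀ n : Nat, n < 10 ^ (w+1) →
    pvFD (w+1) n = (pvDigits n).reverse ++ List.replicate (w + 1 - (pvDigits n).length) '0' := by
  induction w with
  | zero =>
    intro n h
    have hn : n < 10 := by simpa using h
    rw [pvFD, pvFD, Nat.mod_eq_of_lt hn, pvDigits, if_pos hn]
    simp
  | succ w ih =>
    intro n h
    by_cases hn : n < 10
    · rw [pvFD, Nat.mod_eq_of_lt hn, Nat.div_eq_of_lt hn, pvFD_zero, pvDigits, if_pos hn]
      simp [List.replicate_succ]
    · have hdiv : n / 10 < 10 ^ (w+1) := by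
        have h10 : (10:Nat) ^ (w+2) = 10 ^ (w+1) * 10 := by ring
        exact Nat.div_lt_of_lt_mul (by omega)
      have hn2 : pvDigits n = pvDigits (n/10) ++ [Nat.digitChar (n%10)] := by
        conv_lhs => rw [pvDigits]
        rw [if_neg (by omega)]
      rw [pvFD, ih (n/10) hdiv, hn2]
      simp only [List.reverse_append, List.reverse_singleton, List.length_append,
        List.length_singleton, List.cons_append]
      have hLen : w + 1 + 1 - ((pvDigits (n/10)).length + 1) = w + 1 - (pvDigits (n/10)).length := by
        omega
      rw [hLen]
      simp

theorem pvInc_fd (w : Nat) : ∀ k : Nat, k + 1 < 10 ^ w → pvInc (pvFD w k) = pvFD w (k+1) := by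
  induction w with
  | zero => intro k h; omega
  | succ w ih =>
    intro k h
    have hpow : (10:Nat) ^ (w+1) = 10 * 10 ^ w := by ring
    by_cases h9 : k % 10 = 9
    · have hd9 : Nat.digitChar (k % 10) = '9' := by rw [h9]; rfl
      rw [hpow] at h
      have hq := Nat.div_add_mod k 10
      rw [pvFD, pvInc, if_pos hd9, ih (k/10) (by omega)]
      have e1 : (k+1) % 10 = 0 := by omega
      have e2 : (k+1) / 10 = k / 10 + 1 := by omega
      rw [pvFD, e1, e2]
      rfl
    · have hd : k % 10 < 9 := by omega
      have hne : Nat.digitChar (k % 10) ≠ '9' ∧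
          Char.ofNat ((Nat.digitChar (k % 10)).toNat + 1) = Nat.digitChar (k % 10 + 1) := by
        set d := k % 10 with hdd
        interval_cases d <;> exact ⟨by decide, by decide⟩
      rw [pvFD, pvInc, if_neg hne.1, hne.2]
      have e1 : (k+1) % 10 = k % 10 + 1 := by omega
      have e2 : (k+1) / 10 = k / 10 := by omega
      rw [pvFD, e1, e2]

def pvInnerStep (st : List Char × List String) : List Char × List String :=
  (pvInc st.1, st.2 ++ [String.ofList (pvInc st.1).reverse])

def pvOuterStep (n : Nat) (st : List Char × List (List String)) : List Char × List (List String) :=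
  ((pvInnerStep^[n] (st.1, [])).1, st.2 ++ [(pvInnerStep^[n] (st.1, [])).2])

theorem pv_foldl_ignore {α β : Type} (g : α → α) (L : List β) (init : α) :
    L.foldl (fun st _ => g st) init = g^[L.length] init := by
  induction L generalizing init with
  | nil => rfl
  | cons x t ih => simp [List.foldl_cons, ih, Function.iterate_succ_apply]

theorem pv_inner_iter (w nn : Nat) (hw : nn < 10 ^ w) :
    ∀ (a s : Nat) (r : List String), s + a ≤ nn →
    pvInnerStep^[a] (pvFD w s, r)
      = (pvFD w (s+a), r ++ (List.range a).map (fun j => String.ofList (pvFD w (s+j+1)).reverse)) := by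
  intro a
  induction a with
  | zero => intro s r _; simp
  | succ a ih =>
    intro s r h
    rw [Function.iterate_succ_apply', ih s r (by omega)]
    unfold pvInnerStep
    simp only
    rw [pvInc_fd w (s+a) (by omega)]
    have e : s + a + 1 = s + (a + 1) := by omega
    rw [e, List.range_succ]
    simp
    rw [← e]

theorem pv_outer_iter (w n : Nat) (hw : n*n < 10 ^ w) :
    ∀ r : Nat, r ≤ n →
    (pvOuterStep n)^[r] (pvFD w 0, [])
      = (pvFD w (r*n), (List.range r).map (fun i =>
          (List.range n).map (fun j => String.ofList (pvFD w (i*n+j+1)).reverse))) := by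
  intro r
  induction r with
  | zero => simp
  | succ r ih =>
    intro h
    rw [Function.iterate_succ_apply', ih (by omega)]
    unfold pvOuterStep
    simp only
    rw [pv_inner_iter w (n*n) hw n (r*n) [] (by
      have : (r+1)*n ≤ n*n := Nat.mul_le_mul_right n (by omega)
      have e : (r+1)*n = r*n + n := by ring
      omega)]
    have e1 : r*n + n = (r+1)*n := by ring
    rw [e1, List.range_succ]
    simp

theorem pv_cell (n L m : Nat) (h2 : m ≤ n*n) (hL : L = (pvDigits (n*n)).length) :
    PySem.Str.zfill (PySem.Int.toStr (m : Int)) (L : Int) = String.ofList (pvFD L m).reverse := by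
  have hLpos : 1 ≤ L := hL ▸ pvDigits_len_pos (n*n)
  have hmono : (pvDigits m).length ≤ L := hL ▸ pvDigits_len_mono h2
  have hmlt : m < 10 ^ L := lt_of_le_of_lt h2 (hL ▸ pvDigits_lt (n*n))
  have hfd : pvFD L m = (pvDigits m).reverse ++ List.replicate (L - (pvDigits m).length) '0' := by
    have e : L - 1 + 1 = L := by omega
    rw [← e]
    exact pvFD_eq (L-1) m (by rw [e]; exact hmlt)
  have hz : PySem.Chars.zfill (pvDigits m) (L : Int)
      = List.replicate (L - (pvDigits m).length) '0' ++ pvDigits m := by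
    have := pv_zfill_digits m (L : Int) (by omega) (by simpa using hmono)
    simpa using this
  show String.ofList (PySem.Chars.zfill (PySem.Int.toStr (m : Int)).toList (L : Int)) = _
  rw [PySem.Int.toList_toStr, pv_toChars_eq, hz, hfd]
  simp


theorem createMatrix_spec_aux2 (N : Int) : createMatrix N = createMatrix_alt N := by
  by_cases hN : N ≤ 0
  · rw [createMatrix, createMatrix_alt, if_pos hN, PySem.List.pyRange_one_eq_nil hN]
    rfl
  · obtain ⟨n, rfl⟩ : ∃ n : Nat, N = (n : Int) :=
      ⟨N.toNat, (Int.toNat_of_nonneg (by omega)).symm⟩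
    have hn : 0 < n := by exact_mod_cast lt_of_not_ge hN
    set L := (pvDigits (n*n)).length with hLdef
    have hNN : (n : Int) * n = ((n*n : Nat) : Int) := by push_cast; ring
    have hwI : PySem.Str.len (PySem.Int.toStr ((n : Int) * n)) = (L : Int) := by
      show ((PySem.Int.toStr ((n : Int) * n)).toList.length : Int) = (L : Int)
      rw [PySem.Int.toList_toStr, hNN, pv_toChars_eq]
    have hlen : (PySem.List.pyRange 0 (n : Int) 1).length = n := by
      rw [PySem.List.pyRange_one]
      simp
    have hw10 : n*n < 10 ^ L := pvDigits_lt (n*n)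
    -- B side: the nested folds are iterates of pvOuterStep
    have hB : createMatrix_alt (n : Int)
        = (List.range n).map (fun i =>
            (List.range n).map (fun j => String.ofList (pvFD L (i*n+j+1)).reverse)) := by
      rw [createMatrix_alt, if_neg hN]
      simp only [hwI]
      have hinner : ∀ st : List Char × List String,
          (PySem.List.pyRange 0 (n : Int) 1).foldl
            (fun (st2 : List Char × List String) _ =>
              (pvInc st2.1, st2.2 ++ [String.ofList (pvInc st2.1).reverse])) st
          = pvInnerStep^[n] st := by
        intro st
        have h := pv_foldl_ignore pvInnerStep (PySem.List.pyRange 0 (n : Int) 1) st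
        rw [hlen] at h
        exact h
      simp only [hinner]
      have houter :
          (PySem.List.pyRange 0 (n : Int) 1).foldl
            (fun (st : List Char × List (List String)) _ =>
              ((pvInnerStep^[n] (st.1, [])).1, st.2 ++ [(pvInnerStep^[n] (st.1, [])).2]))
            (List.replicate (L : Int).toNat '0', [])
          = (pvOuterStep n)^[n] (List.replicate (L : Int).toNat '0', []) := by
        have h := pv_foldl_ignore (pvOuterStep n) (PySem.List.pyRange 0 (n : Int) 1)
          (List.replicate (L : Int).toNat '0', [])
        rw [hlen] at h
        exact h
      rw [houter]
      rw [show (List.replicate ((L : Int)).toNat '0' : List Char) = pvFD L 0 by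
        rw [pvFD_zero]; simp]
      rw [pv_outer_iter L n hw10 n le_rfl]
    -- A side: closed form
    have hA : createMatrix (n : Int)
        = (List.range n).map (fun (i : Nat) =>
            (List.range n).map (fun (k : Nat) =>
              PySem.Str.zfill (PySem.Int.toStr ((n : Int) * (i:Int) + (k:Int) + 1)) ((L : Int)))) := by
      rw [createMatrix]
      simp only [PySem.List.foldl_append_singleton_eq_map, List.nil_append, hwI]
      rw [PySem.List.pyRange_one 0 (n : Int)]
      rw [show ((n:Int) - 0).toNat = n by omega]
      rw [List.map_map]
      apply List.map_congr_left
      intro i _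
      simp only [Function.comp]
      rw [PySem.List.pyRange_one ((n : Int) * (0 + (i:Int))) ((n : Int) * (0 + (i:Int)) + n)]
      rw [show ((n : Int) * (0 + (i:Int)) + n - (n : Int) * (0 + (i:Int))) = ((n:Nat) : Int) by ring]
      rw [Int.toNat_natCast, List.map_map]
      apply List.map_congr_left
      intro k _
      simp only [Function.comp]
      rw [show (n : Int) * (0 + (i:Int)) + (k:Int) + 1 = (n : Int) * (i:Int) + (k:Int) + 1 by ring]
    rw [hA, hB]
    apply List.map_congr_left
    intro i hi
    rw [List.mem_range] at hi
    apply List.map_congr_left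
    intro k hk
    rw [List.mem_range] at hk
    rw [show (n : Int) * (i:Int) + (k:Int) + 1 = ((i*n+k+1 : Nat) : Int) by push_cast; ring]
    refine pv_cell n L (i*n+k+1) ?_ rfl
    have h1 : (i+1)*n ≤ n*n := Nat.mul_le_mul_right n (by omega)
    have e : (i+1)*n = i*n + n := by ring
    omega

-- ===== VERDICT =====
theorem createMatrix_spec : Claim_equal_createMatrix := by
  intro N _
  unfold Spec_createMatrix
  exact createMatrix_spec_aux2 N
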